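-- pv_equiv track=rewrite | github.com/praxosAi/hetairos | src/utils/file_validator.py | _is_mime_allowed
-- ===== SOURCE A (Python) =====
-- ALLOWED_FILE_TYPES = {
--     'image': {
--         'mime_types': [
--             'image/jpeg',
--             'image/png',
--             'image/gif',
--             'image/webp',
--             'image/bmp',
--             'image/svg+xml',
--             'image/x-icon',
--             'image/vnd.microsoft.icon'
--         ],
--         'extensions': ['.jpg', '.jpeg', '.png', '.gif', '.webp', '.bmp', '.svg', '.ico']
--     },
--     'video': {
--         'mime_types': [
--             'video/mp4',
--             'video/quicktime',
--             'video/x-msvideo',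
--             'video/webm',
--             'video/x-matroska',
--             'video/mpeg'
--         ],
--         'extensions': ['.mp4', '.mov', '.avi', '.webm', '.mkv', '.mpeg', '.mpg']
--     },
--     'audio': {
--         'mime_types': [
--             'audio/mpeg',
--             'audio/ogg',
--             'audio/wav',
--             'audio/webm',
--             'audio/mp4',
--             'audio/x-m4a',
--             'audio/aac',
--             'audio/flac'
--         ],
--         'extensions': ['.mp3', '.ogg', '.wav', '.m4a', '.aac', '.flac', '.opus']
--     },
--     'document': {
--         'mime_types': [
--             'application/pdf',
--             'application/msword',
--             'application/vnd.openxmlformats-officedocument.wordprocessingml.document',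
--             'application/vnd.ms-excel',
--             'application/vnd.openxmlformats-officedocument.spreadsheetml.sheet',
--             'application/vnd.ms-powerpoint',
--             'application/vnd.openxmlformats-officedocument.presentationml.presentation',
--             'text/plain',
--             'text/csv',
--             'application/json',
--             'application/rtf'
--         ],
--         'extensions': [
--             '.pdf', '.doc', '.docx', '.xls', '.xlsx',
--             '.ppt', '.pptx', '.txt', '.csv', '.json', '.rtf'
--         ]
--     }
-- }
--
-- def _is_mime_allowed(mime_type: str) -> bool:
--     """Check if MIME type is in allowed list"""
--     for category, config in ALLOWED_FILE_TYPES.items():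
--         if mime_type in config['mime_types']:
--             return True
--
--         # Check if it's a valid subtype of allowed category
--         mime_category = mime_type.split('/')[0]
--         allowed_category = any(
--             allowed.split('/')[0] == mime_category
--             for allowed in config['mime_types']
--         )
--         if allowed_category and mime_category in ['image', 'video', 'audio']:
--             # Allow image/*, video/*, audio/* even if not explicitly listed
--             return True
--
--     return False
-- ===== SOURCE B (Python) =====
-- MEDIA_PREFIXES = ('image', 'video', 'audio')
--
-- # subtype table keyed by prefix: only non-media categories need explicit listing,
-- # since every image/*, video/*, audio/* mime is wholesale-allowed by prefix.
-- DOC_SUBTYPES = {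
--     'application': frozenset({
--         'pdf', 'msword',
--         'vnd.openxmlformats-officedocument.wordprocessingml.document',
--         'vnd.ms-excel',
--         'vnd.openxmlformats-officedocument.spreadsheetml.sheet',
--         'vnd.ms-powerpoint',
--         'vnd.openxmlformats-officedocument.presentationml.presentation',
--         'json', 'rtf',
--     }),
--     'text': frozenset({'plain', 'csv'}),
-- }
--
--
-- def _is_mime_allowed(mime_type: str) -> bool:
--     """Check if MIME type is in allowed list"""
--     parts = mime_type.split('/')
--     if parts[0] in MEDIA_PREFIXES:
--         return True
--     if len(parts) != 2:
--         return False
--     return parts[1] in DOC_SUBTYPES.get(parts[0], frozenset())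
-- ===== Notes on version B (the rewrite author's own statement) =====
-- stated objective: simpler
-- what changed: Replaces A's per-category loop (full-mime membership plus a nested any() prefix scan per category) by splitting the mime into prefix/subtype once: a prefix test against ('image','video','audio') and a subtype lookup in a prefix-keyed dict of frozensets, with no table of full mime strings.
import Mathlib
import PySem

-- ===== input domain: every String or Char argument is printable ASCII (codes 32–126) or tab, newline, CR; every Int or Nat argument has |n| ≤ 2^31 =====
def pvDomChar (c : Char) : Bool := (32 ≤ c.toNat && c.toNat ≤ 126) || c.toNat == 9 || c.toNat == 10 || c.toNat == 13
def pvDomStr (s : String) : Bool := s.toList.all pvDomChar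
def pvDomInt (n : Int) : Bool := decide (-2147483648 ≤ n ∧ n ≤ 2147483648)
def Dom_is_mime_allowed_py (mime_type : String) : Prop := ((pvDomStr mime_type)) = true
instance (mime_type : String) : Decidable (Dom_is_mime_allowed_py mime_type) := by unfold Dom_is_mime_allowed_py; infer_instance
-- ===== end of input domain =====

-- ===== PORT A =====
-- B replaces A's per-category scan (membership in full mime lists plus a nested any() prefix
-- scan) by a split into prefix/subtype: a prefix test against the three media prefixes, then a
-- subtype lookup in a prefix-keyed dict; no table of full mime strings (objective: simpler).

-- ALLOWED_FILE_TYPES, restricted to the 'mime_types' field A reads (insertion order kept)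
def pvCats : List (String × List String) :=
  [("image", ["image/jpeg", "image/png", "image/gif", "image/webp", "image/bmp",
              "image/svg+xml", "image/x-icon", "image/vnd.microsoft.icon"]),
   ("video", ["video/mp4", "video/quicktime", "video/x-msvideo", "video/webm",
              "video/x-matroska", "video/mpeg"]),
   ("audio", ["audio/mpeg", "audio/ogg", "audio/wav", "audio/webm", "audio/mp4",
              "audio/x-m4a", "audio/aac", "audio/flac"]),
   ("document", ["application/pdf", "application/msword",
                 "application/vnd.openxmlformats-officedocument.wordprocessingml.document",
                 "application/vnd.ms-excel",
                 "application/vnd.openxmlformats-officedocument.spreadsheetml.sheet",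
                 "application/vnd.ms-powerpoint",
                 "application/vnd.openxmlformats-officedocument.presentationml.presentation",
                 "text/plain", "text/csv", "application/json", "application/rtf"])]

-- s.split('/')[0]  (split? with a nonempty literal sep is always `some`, and the result is nonempty, so [0] never raises)
def pvPrefix (s : String) : String := ((PySem.Str.split? s "/").getD []).headD ""

-- the for-loop of A with its early returns
def pvALoop (mime_type : String) : List (String × List String) → Bool
  | [] => false
  | (_, mts) :: rest =>
    if mime_type ∈ mts then true
    else
      let mime_category := pvPrefix mime_type
      let allowed_category := mts.any (fun allowed => pvPrefix allowed == mime_category)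
      if allowed_category && ["image", "video", "audio"].contains mime_category then true
      else pvALoop mime_type rest

def is_mime_allowed_py (mime_type : String) : Bool :=
  pvALoop mime_type pvCats

-- ===== PORT B =====
def pvMediaPrefixes : List String := ["image", "video", "audio"]

-- subtype table keyed by prefix: only the non-media categories need explicit subtypes
def pvDocSubtypes : PySem.Dict String (PySem.Set String) :=
  PySem.Dict.ofList
    [("application", PySem.Set.ofList
        ["pdf", "msword",
         "vnd.openxmlformats-officedocument.wordprocessingml.document",
         "vnd.ms-excel",
         "vnd.openxmlformats-officedocument.spreadsheetml.sheet",
         "vnd.ms-powerpoint",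
         "vnd.openxmlformats-officedocument.presentationml.presentation",
         "json", "rtf"]),
     ("text", PySem.Set.ofList ["plain", "csv"])]

def is_mime_allowed_py_alt (mime_type : String) : Bool :=
  let parts := (PySem.Str.split? mime_type "/").getD []
  if pvMediaPrefixes.contains (PySem.List.pyGetD parts 0 "") then true
  else if PySem.List.len parts ≠ 2 then false
  else (pvDocSubtypes.getD (PySem.List.pyGetD parts 0 "") (PySem.Set.ofList [])).contains
        (PySem.List.pyGetD parts 1 "")

-- ===== PRECONDITION & SPEC =====
def Spec_is_mime_allowed_py (mime_type : String) (out : Bool) : Prop := out = is_mime_allowed_py_alt mime_type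
instance (mime_type : String) (out : Bool) : Decidable (Spec_is_mime_allowed_py mime_type out) := by unfold Spec_is_mime_allowed_py; infer_instance

-- ===== CLAIM (what is proved, stated in full; the proofs are below) =====
def Claim_equal_is_mime_allowed_py : Prop := ∀ (mime_type : String), Dom_is_mime_allowed_py mime_type → Spec_is_mime_allowed_py mime_type (is_mime_allowed_py mime_type)

-- ===== LEMMAS AND PROOFS =====

-- reference splitter: str.split('/') as a plain structural recursion over the characters
def pvS : List Char → List (List Char)
  | [] => [[]]
  | c :: rest =>
    if c = '/' then [] :: pvS rest
    else
      match pvS rest with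
      | [] => [[c]]
      | p :: ps => (c :: p) :: ps

theorem pvS_ne_nil : ∀ cs : List Char, pvS cs ≠ []
  | [] => by simp [pvS]
  | c :: rest => by
    simp only [pvS]
    split_ifs
    · simp
    · cases h : pvS rest with
      | nil => simp
      | cons p ps => simp

theorem pvGo_eq : ∀ (fuel : Nat) (l cur : List Char) (acc : List (List Char)),
    l.length < fuel →
    PySem.Chars.splitOn.go ['/'] fuel l cur acc
      = acc.reverse ++ (pvS l).modifyHead (cur.reverse ++ ·) := by
  intro fuel
  induction fuel with
  | zero => intro l cur acc h; omega
  | succ fuel ih =>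
    intro l cur acc h
    cases l with
    | nil =>
      rw [PySem.Chars.splitOn.go.eq_def]
      simp [pvS]
    | cons c rest =>
      rw [PySem.Chars.splitOn.go.eq_def]
      by_cases hc : c = '/'
      · have hpre : List.isPrefixOf ['/'] (c :: rest) = true := by
          simp [List.isPrefixOf, hc]
        simp only [hpre, if_true]
        rw [show List.drop (['/'] : List Char).length (c :: rest) = rest from rfl]
        rw [ih rest [] (cur.reverse :: acc) (by simpa using Nat.lt_of_succ_lt_succ h)]
        cases hS : pvS rest with
        | nil => exact absurd hS (pvS_ne_nil rest)
        | cons p ps => simp [pvS, hc, hS, List.modifyHead]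
      · have hpre : List.isPrefixOf ['/'] (c :: rest) = false := by
          simp [List.isPrefixOf]
          exact fun he => hc he.symm
        simp only [hpre, Bool.false_eq_true, if_false]
        rw [ih rest (c :: cur) acc (by simpa using Nat.lt_of_succ_lt_succ h)]
        simp only [pvS, hc, if_false]
        cases hS : pvS rest with
        | nil => exact absurd hS (pvS_ne_nil rest)
        | cons p ps => simp

theorem pvSplitOn_eq (cs : List Char) : PySem.Chars.splitOn cs ['/'] = pvS cs := by
  rw [PySem.Chars.splitOn, pvGo_eq (cs.length + 1) cs [] [] (Nat.lt_succ_self _)]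
  cases h : pvS cs with
  | nil => exact absurd h (pvS_ne_nil cs)
  | cons p ps => simp

theorem pvParts (m : String) :
    ∃ parts, PySem.Str.split? m "/" = some parts ∧ parts.map String.toList = pvS m.toList := by
  have h := PySem.Str.split?_map m "/"
  cases hs : PySem.Str.split? m "/" with
  | none =>
    rw [hs] at h
    simp [PySem.Chars.split?] at h
  | some parts =>
    refine ⟨parts, rfl, ?_⟩
    rw [hs] at h
    have hsep : ("/" : String).toList = ['/'] := by decide
    rw [hsep] at h
    simpa [PySem.Chars.split?, pvSplitOn_eq] using h

theorem pvS_one : ∀ (cs x : List Char), pvS cs = [x] → cs = x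
  | [], x => by intro h; simp only [pvS] at h; exact (List.cons_eq_cons.mp h).1
  | c :: rest, x => by
    intro h
    simp only [pvS] at h
    split_ifs at h with hc
    · injection h with _ h2
      exact absurd h2.symm (fun he => pvS_ne_nil rest (by rw [← he]))
    · cases hS : pvS rest with
      | nil => exact absurd hS (pvS_ne_nil rest)
      | cons p ps =>
        rw [hS] at h
        injection h with hx hps
        subst hps
        rw [pvS_one rest p hS, hx]

theorem pvS_two : ∀ (cs x y : List Char), pvS cs = [x, y] → cs = x ++ '/' :: y
  | [], x, y => by intro h; simp [pvS] at h
  | c :: rest, x, y => by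
    intro h
    simp only [pvS] at h
    split_ifs at h with hc
    · injection h with hx hy
      subst hc
      rw [← hx, pvS_one rest y hy]
      simp
    · cases hS : pvS rest with
      | nil => exact absurd hS (pvS_ne_nil rest)
      | cons p ps =>
        rw [hS] at h
        injection h with hx hps
        have : rest = p ++ '/' :: y := pvS_two rest p y (by rw [hS, hps])
        rw [← hx]
        simp [this]

-- A's loop returns true as soon as some category's nested any() prefix test fires together with the media check
theorem pvALoop_true_of_any (m : String) : ∀ l : List (String × List String),
    (∃ p ∈ l, (p.2.any (fun a => pvPrefix a == pvPrefix m)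
        && ["image", "video", "audio"].contains (pvPrefix m)) = true) →
    pvALoop m l = true
  | [] => by rintro ⟨p, hp, _⟩; simp at hp
  | (c, mts) :: rest => by
    rintro ⟨p, hp, hcond⟩
    show (if m ∈ mts then true
      else if ((mts.any fun allowed => pvPrefix allowed == pvPrefix m)
          && ["image", "video", "audio"].contains (pvPrefix m)) = true then true
      else pvALoop m rest) = true
    split_ifs with hmem hc
    · rfl
    · rfl
    · rcases List.mem_cons.mp hp with rfl | htail
      · exact absurd hcond hc
      · exact pvALoop_true_of_any m rest ⟨p, htail, hcond⟩

-- A's loop returns false when the mime is in no category list and the prefix is not a media prefix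
theorem pvALoop_false (m : String) (hc : ["image", "video", "audio"].contains (pvPrefix m) = false) :
    ∀ l : List (String × List String), (∀ p ∈ l, m ∉ p.2) → pvALoop m l = false
  | [] => by intro _; rfl
  | (c, mts) :: rest => by
    intro h
    show (if m ∈ mts then true
      else if ((mts.any fun allowed => pvPrefix allowed == pvPrefix m)
          && ["image", "video", "audio"].contains (pvPrefix m)) = true then true
      else pvALoop m rest) = false
    rw [if_neg (h (c, mts) (List.mem_cons_self ..)),
      if_neg (by rw [Bool.and_eq_true, hc]; exact fun hcon => Bool.false_ne_true hcon.2),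
      pvALoop_false m hc rest (fun p hp => h p (List.mem_cons_of_mem _ hp))]

-- if the prefix is a media prefix, A's loop returns true (the matching category always exists)
theorem pvA_true_of_media (m : String)
    (hp : pvPrefix m = "image" ∨ pvPrefix m = "video" ∨ pvPrefix m = "audio") :
    is_mime_allowed_py m = true := by
  rcases hp with hp | hp | hp
  · exact pvALoop_true_of_any m pvCats ⟨pvCats[0]!, by decide, by rw [hp]; decide⟩
  · exact pvALoop_true_of_any m pvCats ⟨pvCats[1]!, by decide, by rw [hp]; decide⟩
  · exact pvALoop_true_of_any m pvCats ⟨pvCats[2]!, by decide, by rw [hp]; decide⟩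

-- on the 33 listed mime strings, A and B agree (both are closed computations there)
theorem pv_eq_of_listed (m : String)
    (hm : m ∈ pvCats.flatMap (fun cfg => cfg.2)) :
    is_mime_allowed_py m = is_mime_allowed_py_alt m := by
  simp only [pvCats, List.flatMap_cons, List.flatMap_nil, List.append_nil, List.mem_append,
    List.mem_cons, List.not_mem_nil, or_false] at hm
  rcases hm with ((h|h|h|h|h|h|h|h)|(h|h|h|h|h|h)|(h|h|h|h|h|h|h|h)|(h|h|h|h|h|h|h|h|h|h|h)) <;>
    subst h <;> decide

-- ===== VERDICT (by name: the statement is the Claim_ definition above) =====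
-- membership in the flat mime list transported along a List Char equality
theorem pvMemFlat (m : String) (cs : List Char) (h : m.toList = cs)
    (hc : cs ∈ (pvCats.flatMap (fun cfg => cfg.2)).map String.toList) :
    m ∈ pvCats.flatMap (fun cfg => cfg.2) := by
  obtain ⟨x, hx, he⟩ := List.mem_map.mp hc
  rwa [String.toList_inj.mp (h.trans he.symm)]

set_option maxHeartbeats 2000000 in
theorem is_mime_allowed_py_spec : Claim_equal_is_mime_allowed_py := by
  intro m _
  unfold Spec_is_mime_allowed_py
  obtain ⟨parts, hsp, hmap⟩ := pvParts m
  cases parts with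
  | nil => simp at hmap; exact (pvS_ne_nil m.toList hmap).elim
  | cons p rest =>
  have hp0 : pvPrefix m = p := by simp [pvPrefix, hsp]
  have hB : is_mime_allowed_py_alt m =
      (if pvMediaPrefixes.contains p then true
       else if PySem.List.len (p :: rest) ≠ 2 then false
       else (pvDocSubtypes.getD p (PySem.Set.ofList [])).contains
            (PySem.List.pyGetD (p :: rest) 1 "")) := by
    simp [is_mime_allowed_py_alt, hsp, PySem.List.pyGetD_zero_cons]
  by_cases hMed : p = "image" ∨ p = "video" ∨ p = "audio"
  · have hA := pvA_true_of_media m (by rw [hp0]; exact hMed)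
    rw [hA, hB]
    rcases hMed with h | h | h <;> simp [pvMediaPrefixes, h]
  · obtain ⟨hM1, hM2, hM3⟩ : p ≠ "image" ∧ p ≠ "video" ∧ p ≠ "audio" := by tauto
    by_cases hm : m ∈ pvCats.flatMap (fun cfg => cfg.2)
    · exact pv_eq_of_listed m hm
    · have hcA : ["image", "video", "audio"].contains (pvPrefix m) = false := by
        rw [hp0]; simp [hM1, hM2, hM3]
      have hA : is_mime_allowed_py m = false :=
        pvALoop_false m hcA pvCats (fun q hq hin => hm (List.mem_flatMap.mpr ⟨q, hq, hin⟩))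
      have hMedC : pvMediaPrefixes.contains p = false := by
        simp [pvMediaPrefixes, hM1, hM2, hM3]
      rw [hA, hB, hMedC]
      simp only [Bool.false_eq_true, if_false]
      by_cases hlen : PySem.List.len (p :: rest) ≠ 2
      · rw [if_pos hlen]
      · have hlen1 : rest.length = 1 := by
          simp [PySem.List.len_eq] at hlen; omega
        obtain ⟨s, rfl⟩ : ∃ s, rest = [s] := by
          cases rest with
          | nil => simp at hlen1
          | cons a t =>
            cases t with
            | nil => exact ⟨a, rfl⟩
            | cons b u => simp at hlen1
        have hrec : m.toList = p.toList ++ '/' :: s.toList :=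
          pvS_two _ _ _ (by simpa using hmap.symm)
        have hg1 : PySem.List.pyGetD [p, s] 1 "" = s := by simp [pysem]
        rw [if_neg hlen, hg1]
        -- the subtype lookup must come back false: otherwise m would be one of the
        -- listed document mimes, contradicting hm
        by_cases hpA : p = "application"
        · subst hpA
          have hset : pvDocSubtypes.getD "application" (PySem.Set.ofList []) =
              PySem.Set.ofList
                ["pdf", "msword",
                 "vnd.openxmlformats-officedocument.wordprocessingml.document",
                 "vnd.ms-excel",
                 "vnd.openxmlformats-officedocument.spreadsheetml.sheet",
                 "vnd.ms-powerpoint",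
                 "vnd.openxmlformats-officedocument.presentationml.presentation",
                 "json", "rtf"] := by rfl
          rw [hset]
          cases hC : PySem.Set.contains (PySem.Set.ofList _) s with
          | false => rfl
          | true =>
            exfalso
            have hmem := (PySem.Set.mem_ofList _ s).mp ((PySem.Set.contains_iff _ s).mp hC)
            apply hm
            simp only [List.mem_cons, List.not_mem_nil, or_false] at hmem
            rcases hmem with h | h | h | h | h | h | h | h | h <;> subst h <;>
              exact pvMemFlat m _ hrec (by decide)
        · by_cases hpT : p = "text"
          · subst hpT
            have hset : pvDocSubtypes.getD "text" (PySem.Set.ofList []) =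
                PySem.Set.ofList ["plain", "csv"] := by rfl
            rw [hset]
            cases hC : PySem.Set.contains (PySem.Set.ofList _) s with
            | false => rfl
            | true =>
              exfalso
              have hmem := (PySem.Set.mem_ofList _ s).mp ((PySem.Set.contains_iff _ s).mp hC)
              apply hm
              simp only [List.mem_cons, List.not_mem_nil, or_false] at hmem
              rcases hmem with h | h <;> subst h <;>
                exact pvMemFlat m _ hrec (by decide)
          · have hnc : pvDocSubtypes.contains p = false := by
              rw [PySem.Dict.contains_eq_decide_mem_keys]
              have hk : pvDocSubtypes.keys = ["application", "text"] := by rfl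
              rw [hk]; simp [hpA, hpT]
            rw [PySem.Dict.getD_of_not_contains pvDocSubtypes (PySem.Set.ofList []) hnc]
            rfl
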